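-- pv_equiv track=rewrite | github.com/giovannaparanhos/paa | TP1/inversion.py | BFS_MOD
-- ===== SOURCE A (Python) =====
-- from collections import deque
--
-- def BFS_MOD(s: int, t: int):
--     '''Breadth-First Search
--     Parameters
--     --------
--     s: int
--         source s
--     t: int
--         target t
--     '''
--     n_visited = [False]*10000
--     distance_s = [0]*10000
--     n_visited[s] = True
--     distance_s[s] = 0
--     Q = deque([s])
--     while Q:
--         u = Q.popleft() #dequeue Q
--         if u == t:
--             return distance_s[t]
--         u_add =  u+1
--         if u_add < 10000 and not n_visited[u_add]:
--             Q.append(u_add)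
--             n_visited[u_add] = True
--             distance_s[u_add] = distance_s[u]+1
--         u_rev = reverse(u)
--         if u_rev<10000 and not n_visited[u_rev]:
--             Q.append(u_rev)
--             distance_s[u_rev] = distance_s[u] + 1
--             n_visited[u_rev] = True
--
-- def reverse(n: str):
--     n_str = str(n) #enforce type
--     n_rev = n_str[::-1]
--     return int(n_rev)
-- ===== SOURCE B (Python) =====
-- def reverse(n: str):
--     n_str = str(n)  # enforce type
--     n_rev = n_str[::-1]
--     return int(n_rev)
--
--
-- def BFS_MOD(s: int, t: int):
--     '''Level-synchronous BFS: frontier lists and a level counter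
--     instead of a deque and a per-node distance array.'''
--     visited = [False] * 10000
--     visited[s] = True
--     frontier = [s]
--     level = 0
--     while frontier:
--         if t in frontier:
--             return level
--         nxt = []
--         for u in frontier:
--             for v in (u + 1, reverse(u)):
--                 if v < 10000 and not visited[v]:
--                     visited[v] = True
--                     nxt.append(v)
--         frontier = nxt
--         level += 1
-- ===== Notes on version B (the rewrite author's own statement) =====
-- stated objective: alternative
-- what changed: Replaced the deque-plus-per-node-distance-array BFS by a level-synchronous BFS that keeps only two frontier lists and an integer level counter, testing membership of t in the whole frontier once per level instead of on each dequeue and never storing distances.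
import Mathlib
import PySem

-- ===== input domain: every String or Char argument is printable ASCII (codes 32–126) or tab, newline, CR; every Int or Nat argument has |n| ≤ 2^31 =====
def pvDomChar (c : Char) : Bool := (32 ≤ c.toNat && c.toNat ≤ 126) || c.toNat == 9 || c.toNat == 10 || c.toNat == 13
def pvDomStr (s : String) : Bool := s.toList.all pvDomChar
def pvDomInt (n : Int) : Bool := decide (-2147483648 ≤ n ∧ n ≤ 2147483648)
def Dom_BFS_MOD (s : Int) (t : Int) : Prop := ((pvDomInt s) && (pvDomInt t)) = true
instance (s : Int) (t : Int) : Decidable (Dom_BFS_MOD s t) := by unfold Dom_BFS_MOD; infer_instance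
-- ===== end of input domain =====

-- B replaces A's deque + per-node distance array by a level-synchronous BFS (two frontier
-- lists and a level counter); equal return value on Pre_, no speed claim.

-- ===== PORT A =====

-- Python list indexing with an Int index: negative wraps; out of range Python raises
-- (unreachable under Pre_): the port returns/keeps the stated default there.
def lidx (len : Nat) (i : Int) : Option Nat :=
  let j := if i < 0 then i + len else i
  if 0 ≤ j ∧ j < len then some j.toNat else none

def lget {α : Type} (L : List α) (d : α) (i : Int) : α :=
  match lidx L.length i with
  | some j => L.getD j d
  | none => d

def lset {α : Type} (L : List α) (i : Int) (x : α) : List α :=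
  match lidx L.length i with
  | some j => L.set j x
  | none => L

-- port of helper `reverse`: str(n) -> PySem.Int.toChars, s[::-1] -> List.reverse
-- (PySem.List.slice?_none_none_neg_one), int(...) -> PySem.Int.ofChars?;
-- none = ValueError, unreachable under Pre_ (getD 0 there).
def revInt (n : Int) : Int :=
  (PySem.Int.ofChars? (PySem.Int.toChars n).reverse).getD 0

theorem count_lset_true (L : List Bool) (i : Int) (hf : lget L true i = false) :
    (lset L i true).count false + 1 = L.count false := by
  unfold lget at hf
  unfold lset
  cases h : lidx L.length i with
  | none => simp [h] at hf
  | some j =>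
    rw [h] at hf
    simp only at hf ⊢
    have hj : j < L.length := by
      unfold lidx at h
      split at h <;> (simp at h; omega)
    rw [List.getD_eq_getElem L true hj] at hf
    clear h
    induction L generalizing j with
    | nil => simp at hj
    | cons a L ih =>
      cases j with
      | zero => simp_all
      | succ j =>
        simp only [List.set_cons_succ, List.count_cons]
        have := ih j (by simpa using hj) (by simpa using hf)
        omega

def loopA (t : Int) (visited : List Bool) (dist : List Int) (Q : List Int) : Option Int :=
  match Q with
  | [] => none
  | u :: Q =>
    if u = t then some (lget dist 0 t)
    else
      let uAdd := u + 1
      let st1 :=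
        if uAdd < 10000 ∧ lget visited true uAdd = false then
          (lset visited uAdd true, lset dist uAdd (lget dist 0 u + 1), Q ++ [uAdd])
        else (visited, dist, Q)
      let uRev := revInt u
      let st2 :=
        if uRev < 10000 ∧ lget st1.1 true uRev = false then
          (lset st1.1 uRev true, lset st1.2.1 uRev (lget st1.2.1 0 u + 1), st1.2.2 ++ [uRev])
        else st1
      loopA t st2.1 st2.2.1 st2.2.2
  termination_by 2 * visited.count false + Q.length
  decreasing_by
    split_ifs with c1 c2 c2
    · have a1 := count_lset_true visited (u + 1) c1.2
      have a2 := count_lset_true (lset visited (u + 1) true) (revInt u) c2.2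
      simp; omega
    · have a1 := count_lset_true visited (u + 1) c1.2
      simp; omega
    · have a2 := count_lset_true visited (revInt u) c2.2
      simp; omega
    · simp

def BFS_MOD (s : Int) (t : Int) : Option Int :=
  let n_visited := lset (List.replicate 10000 false) s true
  let distance_s := lset (List.replicate 10000 (0 : Int)) s 0
  loopA t n_visited distance_s [s]

def stepB (acc : List Bool × List Int) (v : Int) : List Bool × List Int :=
  if v < 10000 ∧ lget acc.1 true v = false then (lset acc.1 v true, acc.2 ++ [v]) else acc

def expandNode (acc : List Bool × List Int) (u : Int) : List Bool × List Int :=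
  [u + 1, revInt u].foldl stepB acc

theorem stepB_bound (acc : List Bool × List Int) (v : Int) :
    2 * (stepB acc v).1.count false + (stepB acc v).2.length
      ≤ 2 * acc.1.count false + acc.2.length := by
  unfold stepB
  split
  · next hc => have := count_lset_true acc.1 v hc.2; simp; omega
  · omega

theorem foldl_stepB_bound (us : List Int) (acc : List Bool × List Int) :
    2 * (us.foldl stepB acc).1.count false + (us.foldl stepB acc).2.length
      ≤ 2 * acc.1.count false + acc.2.length := by
  induction us generalizing acc with
  | nil => simp
  | cons u us ih =>
    simp only [List.foldl_cons]
    exact le_trans (ih (stepB acc u)) (stepB_bound acc u)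

theorem foldl_expandNode_bound (us : List Int) (acc : List Bool × List Int) :
    2 * (us.foldl expandNode acc).1.count false + (us.foldl expandNode acc).2.length
      ≤ 2 * acc.1.count false + acc.2.length := by
  induction us generalizing acc with
  | nil => simp
  | cons u us ih =>
    simp only [List.foldl_cons]
    exact le_trans (ih (expandNode acc u)) (foldl_stepB_bound _ acc)

def loopB (t : Int) (visited : List Bool) (frontier : List Int) (level : Int) : Option Int :=
  if hf : frontier = [] then none
  else if t ∈ frontier then some level
  else
    let p := frontier.foldl expandNode (visited, [])
    loopB t p.1 p.2 (level + 1)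
  termination_by 2 * visited.count false + frontier.length
  decreasing_by
    have h := foldl_expandNode_bound frontier (visited, [])
    have : 1 ≤ frontier.length := by
      cases frontier with
      | nil => exact absurd rfl hf
      | cons a l => simp
    simp at h ⊢
    omega

def BFS_MOD_alt (s : Int) (t : Int) : Option Int :=
  let visited := lset (List.replicate 10000 false) s true
  loopB t visited [s] 0

-- ===== PRECONDITION & SPEC =====
-- Pre_ admits exactly the inputs on which the Python A returns: 0 <= s < 10000, or a
-- negative in-range s equal to t (Python's negative-index wraparound; A returns 0 there).
-- Elsewhere A raises IndexError (s out of [-10000,10000)) or ValueError in reverse()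
-- (negative s popped with s != t).
def Pre_BFS_MOD (s : Int) (t : Int) : Prop :=
  (0 ≤ s ∧ s < 10000) ∨ (-10000 ≤ s ∧ s < 0 ∧ s = t)
instance (s : Int) (t : Int) : Decidable (Pre_BFS_MOD s t) := by unfold Pre_BFS_MOD; infer_instance

def pvWitness_BFS_MOD : Int × Int := (3, 21)

def Spec_BFS_MOD (s : Int) (t : Int) (out : Option Int) : Prop := out = BFS_MOD_alt s t
instance (s : Int) (t : Int) (out : Option Int) : Decidable (Spec_BFS_MOD s t out) := by unfold Spec_BFS_MOD; infer_instance

-- ===== CLAIM (what is proved, stated in full; the proofs are below) =====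
def Claim_equal_BFS_MOD : Prop := ∀ (s : Int) (t : Int), Dom_BFS_MOD s t → Pre_BFS_MOD s t → Spec_BFS_MOD s t (BFS_MOD s t)

-- ===== LEMMAS AND PROOFS =====

theorem digitChar_isDigit (m : Nat) (h : m < 10) : (Nat.digitChar m).isDigit = true := by
  interval_cases m <;> decide

theorem toDigitsCore_digits (f : Nat) : ∀ (n : Nat) (ds : List Char),
    (∀ c ∈ ds, c.isDigit = true) → ∀ c ∈ Nat.toDigitsCore 10 f n ds, c.isDigit = true := by
  induction f with
  | zero => intro n ds hds c hc; exact hds c hc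
  | succ f ih =>
    intro n ds hds c hc
    unfold Nat.toDigitsCore at hc
    simp only at hc
    have hd : ∀ c ∈ Nat.digitChar (n % 10) :: ds, c.isDigit = true := by
      intro c hc
      rcases List.mem_cons.mp hc with h | h
      · subst h; exact digitChar_isDigit _ (Nat.mod_lt _ (by norm_num))
      · exact hds c h
    split at hc
    · exact hd c hc
    · exact ih _ _ hd c hc

theorem toChars_digits (n : Int) (h : 0 ≤ n) :
    ∀ c ∈ PySem.Int.toChars n, c.isDigit = true := by
  unfold PySem.Int.toChars
  rw [if_neg (by omega)]
  exact toDigitsCore_digits _ _ [] (by simp)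

theorem digit_not_space (c : Char) (h : c.isDigit = true) : PySem.Int.isIntSpace c = false := by
  unfold PySem.Int.isIntSpace
  simp only [Bool.or_eq_false_iff, decide_eq_false_iff_not]
  refine ⟨⟨⟨⟨⟨?_, ?_⟩, ?_⟩, ?_⟩, ?_⟩, ?_⟩ <;> rintro rfl <;> simp [Char.isDigit] at h

theorem dropWhile_id_of_digits (cs : List Char) (h : ∀ c ∈ cs, c.isDigit = true) :
    cs.dropWhile PySem.Int.isIntSpace = cs := by
  cases cs with
  | nil => simp
  | cons a l =>
    rw [List.dropWhile_cons_of_neg]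
    simp [digit_not_space a (h a (by simp))]

theorem optNat_nonneg (o : Option Nat) :
    0 ≤ (Option.map (fun n : Int => n) (o.bind fun a => pure ((a : Int)))).getD 0 := by
  cases o <;> simp

theorem ofChars?_digits_nonneg (cs : List Char) (h : ∀ c ∈ cs, c.isDigit = true) :
    0 ≤ (PySem.Int.ofChars? cs).getD 0 := by
  have hrev : ∀ c ∈ cs.reverse, c.isDigit = true := by simpa using h
  unfold PySem.Int.ofChars?
  simp only [dropWhile_id_of_digits cs h, dropWhile_id_of_digits _ hrev,
    List.reverse_reverse]
  cases cs with
  | nil => exact optNat_nonneg _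
  | cons a l =>
    have ha : a.isDigit = true := h a (by simp)
    have h1 : a ≠ '-' := by rintro rfl; simp [Char.isDigit] at ha
    have h2 : a ≠ '+' := by rintro rfl; simp [Char.isDigit] at ha
    split
    · next heq => rw [List.cons.injEq] at heq; exact absurd heq.1 h1
    · next heq => rw [List.cons.injEq] at heq; exact absurd heq.1 h2
    · exact optNat_nonneg _

theorem revInt_nonneg (n : Int) (h : 0 ≤ n) : 0 ≤ revInt n := by
  unfold revInt
  apply ofChars?_digits_nonneg
  intro c hc
  exact toChars_digits n h c (List.mem_reverse.mp hc)

theorem length_lset {α : Type} (L : List α) (i : Int) (x : α) :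
    (lset L i x).length = L.length := by
  unfold lset; cases h : lidx L.length i <;> simp


theorem lidx_in (len : Nat) (i : Int) (h0 : 0 ≤ i) (h1 : i < (len : Int)) :
    lidx len i = some i.toNat := by
  unfold lidx
  simp only [show (if i < 0 then i + (len : Int) else i) = i from if_neg (by omega)]
  rw [if_pos ⟨h0, h1⟩]

theorem lget_in {α : Type} (L : List α) (d : α) (i : Int) (h0 : 0 ≤ i)
    (h1 : i < (L.length : Int)) : lget L d i = L.getD i.toNat d := by
  unfold lget; rw [lidx_in _ _ h0 h1]

theorem lset_in {α : Type} (L : List α) (i : Int) (x : α) (h0 : 0 ≤ i)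
    (h1 : i < (L.length : Int)) : lset L i x = L.set i.toNat x := by
  unfold lset; rw [lidx_in _ _ h0 h1]

theorem lget_lset_self {α : Type} (L : List α) (i : Int) (x d : α) (h0 : 0 ≤ i)
    (h1 : i < (L.length : Int)) : lget (lset L i x) d i = x := by
  rw [lset_in L i x h0 h1, lget_in _ _ _ h0 (by simpa using h1)]
  rw [List.getD_eq_getElem _ _ (by simp; omega)]
  simp

theorem lget_lset_ne {α : Type} (L : List α) (i j : Int) (x d : α) (h0 : 0 ≤ i)
    (h1 : i < (L.length : Int)) (hj : 0 ≤ j) (hne : i ≠ j) :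
    lget (lset L i x) d j = lget L d j := by
  rw [lset_in L i x h0 h1]
  unfold lget
  rw [List.length_set]
  cases hx : lidx L.length j with
  | none => rfl
  | some k =>
    have hk : k = j.toNat ∧ j < (L.length : Int) := by
      unfold lidx at hx
      split at hx <;> simp at hx <;> omega
    show (L.set i.toNat x).getD k d = L.getD k d
    rw [List.getD_eq_getElem _ _ (by simp; omega), List.getD_eq_getElem _ _ (by omega)]
    rw [List.getElem_set_ne (by omega)]

def measN (v : List Bool) (cur nxt : List Int) : Nat :=
  2 * (2 * v.count false + cur.length + nxt.length) + (if cur = [] then 1 else 0)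

def GoodState (v : List Bool) (d : List Int) (cur nxt : List Int) (L : Int) : Prop :=
  v.length = 10000 ∧ d.length = 10000 ∧
  (∀ u ∈ cur, 0 ≤ u ∧ u < 10000 ∧ lget v true u = true ∧ lget d 0 u = L) ∧
  (∀ u ∈ nxt, 0 ≤ u ∧ u < 10000 ∧ lget v true u = true ∧ lget d 0 u = L + 1)

theorem enq_good (v : List Bool) (d : List Int) (cur nxt : List Int) (L : Int) (a : Int)
    (hG : GoodState v d cur nxt L) (ha0 : 0 ≤ a) (ha1 : a < 10000)
    (hav : lget v true a = false) :
    GoodState (lset v a true) (lset d a (L + 1)) cur (nxt ++ [a]) L := by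
  obtain ⟨hv, hd, hc, hn⟩ := hG
  have hv' : (v.length : Int) = 10000 := by exact_mod_cast hv
  have hd' : (d.length : Int) = 10000 := by exact_mod_cast hd
  refine ⟨by rw [length_lset, hv], by rw [length_lset, hd], ?_, ?_⟩
  · intro u hu
    obtain ⟨u0, u1, uv, ud⟩ := hc u hu
    have hau : a ≠ u := by rintro rfl; rw [uv] at hav; exact absurd hav (by simp)
    exact ⟨u0, u1,
      by rw [lget_lset_ne v a u true true ha0 (by omega) u0 hau]; exact uv,
      by rw [lget_lset_ne d a u (L+1) 0 ha0 (by omega) u0 hau]; exact ud⟩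
  · intro u hu
    rcases List.mem_append.mp hu with hu | hu
    · obtain ⟨u0, u1, uv, ud⟩ := hn u hu
      have hau : a ≠ u := by rintro rfl; rw [uv] at hav; exact absurd hav (by simp)
      exact ⟨u0, u1,
        by rw [lget_lset_ne v a u true true ha0 (by omega) u0 hau]; exact uv,
        by rw [lget_lset_ne d a u (L+1) 0 ha0 (by omega) u0 hau]; exact ud⟩
    · rw [List.mem_singleton] at hu
      subst hu
      exact ⟨ha0, ha1,
        lget_lset_self v u true true ha0 (by omega),
        lget_lset_self d u (L+1) 0 ha0 (by omega)⟩

def bPhase (t : Int) (v : List Bool) (cur nxt : List Int) (L : Int) : Option Int :=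
  if t ∈ cur then some L
  else
    let p := cur.foldl expandNode (v, nxt)
    loopB t p.1 p.2 (L + 1)

theorem bPhase_nil (t : Int) (v : List Bool) (nxt : List Int) (L : Int) :
    bPhase t v [] nxt L = loopB t v nxt (L + 1) := by
  unfold bPhase
  rw [if_neg (List.not_mem_nil)]
  simp only [List.foldl_nil]

theorem loopB_eq_bPhase (t : Int) (v : List Bool) (f : List Int) (L : Int) :
    loopB t v f L = bPhase t v f [] L := by
  by_cases hf : f = []
  · subst hf
    rw [loopB]
    unfold bPhase
    simp only [List.not_mem_nil, if_neg (fun h => h), List.foldl_nil]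
    rw [loopB]
    simp
  · rw [loopB, dif_neg hf]
    rfl

theorem bPhase_cons (t : Int) (v : List Bool) (u : Int) (cur nxt : List Int) (L : Int)
    (h : ¬ t = u) :
    bPhase t v (u :: cur) nxt L
      = bPhase t (expandNode (v, nxt) u).1 cur (expandNode (v, nxt) u).2 L := by
  unfold bPhase
  simp only [List.mem_cons, List.foldl_cons]
  by_cases hc : t ∈ cur
  · rw [if_pos (Or.inr hc), if_pos hc]
  · rw [if_neg (by tauto), if_neg hc]

theorem mainA (N : Nat) : ∀ (t : Int) (v : List Bool) (d : List Int)
    (cur nxt : List Int) (L : Int),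
    measN v cur nxt ≤ N → GoodState v d cur nxt L →
    loopA t v d (cur ++ nxt) = bPhase t v cur nxt L := by
  induction N with
  | zero =>
    intro t v d cur nxt L hm _
    exfalso
    unfold measN at hm
    cases cur <;> simp at hm
  | succ N ih =>
    intro t v d cur nxt L hm hG
    cases cur with
    | nil =>
      cases nxt with
      | nil =>
        rw [List.nil_append, loopA]
        unfold bPhase
        rw [if_neg (List.not_mem_nil)]
        simp only [List.foldl_nil]
        rw [loopB]
        simp
      | cons b nb =>
        obtain ⟨hv, hd, _, hn⟩ := hG
        have hG' : GoodState v d (b :: nb) [] (L + 1) := ⟨hv, hd, fun u hu => hn u hu, by simp⟩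
        have hm' : measN v (b :: nb) [] ≤ N := by
          unfold measN at hm ⊢; simp at hm ⊢; omega
        have hmain := ih t v d (b :: nb) [] (L + 1) hm' hG'
        rw [List.append_nil] at hmain
        rw [List.nil_append, hmain, bPhase_nil, loopB_eq_bPhase]
    | cons u cur' =>
      obtain ⟨hv, hd, hc, hn⟩ := hG
      obtain ⟨u0, u1, uv, ud⟩ := hc u (by simp)
      by_cases ht : u = t
      · rw [List.cons_append, loopA, if_pos ht]
        unfold bPhase
        rw [if_pos (by rw [← ht]; exact List.mem_cons_self)]
        rw [← ht, ud]
      · rw [List.cons_append, loopA, if_neg ht]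
        rw [bPhase_cons t v u cur' nxt L (fun he => ht he.symm)]
        simp only
        split_ifs with c1 c2 c2
        · -- both neighbours enqueued
          have G1 := enq_good v d (u :: cur') nxt L (u + 1) ⟨hv, hd, hc, hn⟩
            (by omega) c1.1 c1.2
          rw [ud]
          have hu2 : lget (lset d (u + 1) (L + 1)) 0 u = L := (G1.2.2.1 u (by simp)).2.2.2
          rw [hu2]
          have G2 := enq_good _ _ (u :: cur') _ L (revInt u) G1
            (revInt_nonneg u u0) c2.1 c2.2
          have G2' : GoodState (lset (lset v (u + 1) true) (revInt u) true)
              (lset (lset d (u + 1) (L + 1)) (revInt u) (L + 1))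
              cur' ((nxt ++ [u + 1]) ++ [revInt u]) L :=
            ⟨G2.1, G2.2.1, fun x hx => G2.2.2.1 x (by simp [hx]), G2.2.2.2⟩
          have a1 := count_lset_true v (u + 1) c1.2
          have a2 := count_lset_true (lset v (u + 1) true) (revInt u) c2.2
          have hm2 : measN (lset (lset v (u + 1) true) (revInt u) true) cur'
              ((nxt ++ [u + 1]) ++ [revInt u]) ≤ N := by
            unfold measN at hm ⊢; simp at hm ⊢; split_ifs <;> omega
          have hE : expandNode (v, nxt) u
              = (lset (lset v (u + 1) true) (revInt u) true, (nxt ++ [u + 1]) ++ [revInt u]) := by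
            simp [expandNode, stepB, c1.1, c1.2, c2.1, c2.2]
          rw [hE]
          have := ih t _ _ cur' _ L hm2 G2'
          simpa [List.append_assoc] using this
        · -- only u+1 enqueued
          have G1 := enq_good v d (u :: cur') nxt L (u + 1) ⟨hv, hd, hc, hn⟩
            (by omega) c1.1 c1.2
          rw [ud]
          have G1' : GoodState (lset v (u + 1) true) (lset d (u + 1) (L + 1))
              cur' (nxt ++ [u + 1]) L :=
            ⟨G1.1, G1.2.1, fun x hx => G1.2.2.1 x (by simp [hx]), G1.2.2.2⟩
          have a1 := count_lset_true v (u + 1) c1.2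
          have hm2 : measN (lset v (u + 1) true) cur' (nxt ++ [u + 1]) ≤ N := by
            unfold measN at hm ⊢; simp at hm ⊢; split_ifs <;> omega
          have hE : expandNode (v, nxt) u = (lset v (u + 1) true, nxt ++ [u + 1]) := by
            simp [expandNode, stepB, c1.1, c1.2, c2]
          rw [hE]
          have := ih t _ _ cur' _ L hm2 G1'
          simpa [List.append_assoc] using this
        · -- only reverse(u) enqueued
          have G1 := enq_good v d (u :: cur') nxt L (revInt u) ⟨hv, hd, hc, hn⟩
            (revInt_nonneg u u0) c2.1 c2.2
          rw [ud]
          have G1' : GoodState (lset v (revInt u) true) (lset d (revInt u) (L + 1))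
              cur' (nxt ++ [revInt u]) L :=
            ⟨G1.1, G1.2.1, fun x hx => G1.2.2.1 x (by simp [hx]), G1.2.2.2⟩
          have a1 := count_lset_true v (revInt u) c2.2
          have hm2 : measN (lset v (revInt u) true) cur' (nxt ++ [revInt u]) ≤ N := by
            unfold measN at hm ⊢; simp at hm ⊢; split_ifs <;> omega
          have hE : expandNode (v, nxt) u = (lset v (revInt u) true, nxt ++ [revInt u]) := by
            simp [expandNode, stepB, c1, c2.1, c2.2]
          rw [hE]
          have := ih t _ _ cur' _ L hm2 G1'
          simpa [List.append_assoc] using this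
        · -- nothing enqueued
          have hm2 : measN v cur' nxt ≤ N := by
            unfold measN at hm ⊢; simp at hm ⊢; split_ifs <;> omega
          have hE : expandNode (v, nxt) u = (v, nxt) := by
            simp [expandNode, stepB, c1, c2]
          rw [hE]
          exact ih t v d cur' nxt L hm2 ⟨hv, hd, fun x hx => hc x (by simp [hx]), hn⟩

theorem lget_all_eq {α : Type} (L : List α) (c : α) (h : ∀ x ∈ L, x = c) (i : Int) :
    lget L c i = c := by
  unfold lget
  cases hx : lidx L.length i with
  | none => rfl
  | some j =>
    have hj : j < L.length := by
      unfold lidx at hx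
      split at hx <;> simp at hx <;> omega
    show L.getD j c = c
    rw [List.getD_eq_getElem _ _ hj]
    exact h _ (List.getElem_mem hj)

theorem BFS_MOD_spec : Claim_equal_BFS_MOD := by
  intro s t _ hpre
  unfold Spec_BFS_MOD BFS_MOD BFS_MOD_alt
  simp only
  rcases hpre with ⟨h0, h1⟩ | ⟨hn0, hn1, hst⟩
  · have hGood : GoodState (lset (List.replicate 10000 false) s true)
        (lset (List.replicate 10000 (0 : Int)) s 0) [s] [] 0 := by
      refine ⟨by rw [length_lset, List.length_replicate], by rw [length_lset, List.length_replicate], ?_, fun u hu => absurd hu (List.not_mem_nil)⟩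
      intro u hu
      rw [List.mem_singleton] at hu
      subst hu
      exact ⟨h0, h1,
        lget_lset_self _ u true true h0 (by rw [List.length_replicate]; omega),
        lget_lset_self _ u 0 0 h0 (by rw [List.length_replicate]; omega)⟩
    have hmain := mainA (measN (lset (List.replicate 10000 false) s true) [s] []) t
      _ _ [s] [] 0 le_rfl hGood
    rw [List.append_nil] at hmain
    rw [hmain, loopB_eq_bPhase]
  · have hall : ∀ x ∈ lset (List.replicate 10000 (0 : Int)) s 0, x = 0 := by
      intro x hx
      unfold lset at hx
      cases hi : lidx (List.replicate 10000 (0 : Int)).length s with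
      | none => rw [hi] at hx; exact List.eq_of_mem_replicate hx
      | some j =>
        rw [hi] at hx
        rcases List.mem_or_eq_of_mem_set hx with h | h
        · exact List.eq_of_mem_replicate h
        · exact h
    rw [loopA, if_pos hst, loopB]
    rw [dif_neg (by simp)]
    rw [if_pos (by rw [List.mem_singleton]; omega)]
    rw [lget_all_eq _ _ hall t]
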